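-- pv_equiv track=rewrite | github.com/xtvqwe/webMall_license_ocr_base_on_paddle | license_try.py | file_split
-- ===== SOURCE A (Python) =====
-- def file_split(names):
--     ids_s=[]
--     reports=[]
--     fnames=[]
--     for nid in range(len(names)):
--         name=names[nid]
--         ids=name.replace('./ocr/static/tmp_license/prove_','').replace('.jpg','').split('_')
--         if len(ids)==1:
--             fnames.append(name)
--         else:
--             ids_s.append(ids)
--     ids_sorted=sorted(ids_s,key=lambda x:x[1],reverse=False)
--     for id_s in ids_sorted:
--         id_include=[x for x in ids_sorted if x[0]==id_s[0]]
--         if len(id_include)==1: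
--             fnames.append('./ocr/static/tmp_license/prove_'+'_'.join(id_s)+'.jpg')
--         else:
--             report_s=['./ocr/static/tmp_license/prove_'+'_'.join(x)+'.jpg' for x in id_include]
--             if report_s not in reports:
--                 reports.append(report_s)
--     return fnames,reports
-- ===== SOURCE B (Python) =====
-- PRE = './ocr/static/tmp_license/prove_'
--
-- def _ids(name):
--     return name.replace(PRE, '').replace('.jpg', '').split('_')
--
-- def _recon(ids):
--     return PRE + '_'.join(ids) + '.jpg'
--
-- def file_split(names):
--     singles = [n for n in names if len(_ids(n)) == 1]
--     multi = sorted((_ids(n) for n in names if len(_ids(n)) != 1), key=lambda x: x[1])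
--     groups = {}
--     for ids in multi:
--         groups.setdefault(ids[0], []).append(_recon(ids))
--     fnames = singles + [g[0] for g in groups.values() if len(g) == 1]
--     reports = [g for g in groups.values() if len(g) > 1]
--     return fnames, reports
-- ===== Notes on version B (the rewrite author's own statement) =====
-- stated objective: alternative
-- what changed: A rescans the whole sorted list for every entry (an inner filter plus a 'not in reports' list scan); B is a staged pipeline: comprehensions split singles from multi-id names, one pass over the sorted multi list builds an insertion-ordered dict keyed by the first id, and singles/reports are read off the dict values by two comprehensions, so both inner scans disappear.
import Mathlib
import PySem

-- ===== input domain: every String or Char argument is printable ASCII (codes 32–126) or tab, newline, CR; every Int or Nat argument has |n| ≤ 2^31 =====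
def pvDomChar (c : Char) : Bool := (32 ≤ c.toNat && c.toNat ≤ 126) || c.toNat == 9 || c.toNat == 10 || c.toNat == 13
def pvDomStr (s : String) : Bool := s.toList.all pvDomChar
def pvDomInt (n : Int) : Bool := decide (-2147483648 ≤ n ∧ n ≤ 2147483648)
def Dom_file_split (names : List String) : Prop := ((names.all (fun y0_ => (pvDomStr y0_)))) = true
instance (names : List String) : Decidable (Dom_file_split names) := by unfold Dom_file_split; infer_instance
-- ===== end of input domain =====

-- B replaces A's per-element rescan of the sorted list (inner filter + 'not in reports' scan)
-- by a staged pipeline: comprehension split, one dict-grouping pass, comprehensions over the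
-- dict values; objective: alternative.

-- ===== PORT A =====
def pvPrefix : String := "./ocr/static/tmp_license/prove_"

-- ids = name.replace('./ocr/static/tmp_license/prove_','').replace('.jpg','').split('_')
-- (the separator is the literal '_', never empty, so Str.split? is always `some`; getD's default is dead)
def pvIds (name : String) : List String :=
  (PySem.Str.split? (PySem.Str.replace (PySem.Str.replace name pvPrefix "") ".jpg" "") "_").getD []

-- './ocr/static/tmp_license/prove_' + '_'.join(ids) + '.jpg'
def pvRecon (ids : List String) : String := pvPrefix ++ PySem.Str.join "_" ids ++ ".jpg"

def file_split (names : List String) : List String × List (List String) :=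
  -- for nid in range(len(names)): name = names[nid]  (index always in range, so pyGetD's default is dead)
  let st1 := (PySem.List.pyRange 0 (PySem.List.len names)).foldl
    (fun (st : List String × List (List String)) nid =>
      let name := PySem.List.pyGetD names nid ""
      let ids := pvIds name
      if ids.length == 1 then (st.1 ++ [name], st.2) else (st.1, st.2 ++ [ids]))
    ([], [])
  let ids_sorted := PySem.List.sorted st1.2 (fun x => PySem.List.pyGetD x 1 "") false
  ids_sorted.foldl
    (fun (st : List String × List (List String)) id_s =>
      let id_include := ids_sorted.filter
        (fun x => PySem.List.pyGetD x 0 "" == PySem.List.pyGetD id_s 0 "")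
      if id_include.length == 1 then (st.1 ++ [pvRecon id_s], st.2)
      else
        let report_s := id_include.map pvRecon
        if report_s ∈ st.2 then st else (st.1, st.2 ++ [report_s]))
    (st1.1, [])

-- ===== PORT B =====
def file_split_alt (names : List String) : List String × List (List String) :=
  -- singles = [n for n in names if len(_ids(n)) == 1]
  let singles := names.filter (fun n => (pvIds n).length == 1)
  -- multi = sorted((_ids(n) for n in names if len(_ids(n)) != 1), key=lambda x: x[1])
  let multi := PySem.List.sorted
    ((names.filter (fun n => !((pvIds n).length == 1))).map pvIds)
    (fun x => PySem.List.pyGetD x 1 "") false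
  -- groups.setdefault(ids[0], []).append(_recon(ids))
  let groups := multi.foldl
    (fun (d : PySem.Dict String (List String)) ids =>
      d.modify (PySem.List.pyGetD ids 0 "") [] (fun g => g ++ [pvRecon ids]))
    PySem.Dict.empty
  -- fnames = singles + [g[0] for g in groups.values() if len(g) == 1]; reports = [g for g in groups.values() if len(g) > 1]
  (singles ++ (groups.values.filter (fun g => g.length == 1)).map (fun g => PySem.List.pyGetD g 0 ""),
   groups.values.filter (fun g => decide (1 < g.length)))

-- ===== PRECONDITION & SPEC =====
def Spec_file_split (names : List String) (out : List String × List (List String)) : Prop := out = file_split_alt names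
instance (names : List String) (out : List String × List (List String)) : Decidable (Spec_file_split names out) := by unfold Spec_file_split; infer_instance

-- ===== CLAIM (what is proved, stated in full; the proofs are below) =====
def Claim_equal_file_split : Prop := ∀ (names : List String), Dom_file_split names → Spec_file_split names (file_split names)

-- ===== LEMMAS AND PROOFS =====

theorem pv_go_ne_nil (sep : List Char) (fuel : Nat) (l cur : List Char) (acc : List (List Char)) :
    PySem.Chars.splitOn.go sep fuel l cur acc ≠ [] := by
  induction fuel generalizing l cur acc with
  | zero => simp [PySem.Chars.splitOn.go]
  | succ fuel ih =>
    cases l with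
    | nil => simp [PySem.Chars.splitOn.go]
    | cons c rest =>
      rw [PySem.Chars.splitOn.go]
      split
      · exact ih _ _ _
      · exact ih _ _ _

theorem pv_go_usc_free (fuel : Nat) (l cur : List Char) (acc : List (List Char))
    (hf : l.length < fuel) (hacc : ∀ p ∈ acc, '_' ∉ p) (hcur : '_' ∉ cur) :
    ∀ p ∈ PySem.Chars.splitOn.go ['_'] fuel l cur acc, '_' ∉ p := by
  induction fuel generalizing l cur acc with
  | zero => omega
  | succ fuel ih =>
    cases l with
    | nil =>
      rw [PySem.Chars.splitOn.go]
      · intro p hp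
        simp only [List.mem_reverse, List.mem_cons] at hp
        rcases hp with h | h
        · subst h; simpa using hcur
        · exact hacc _ h
      · omega
    | cons c rest =>
      rw [PySem.Chars.splitOn.go]
      by_cases hc : c = '_'
      · subst hc
        simp only [List.isPrefixOf, BEq.rfl, Bool.true_and, if_pos]
        simp only [List.length_cons] at hf
        apply ih _ _ _ (by simpa using Nat.lt_of_succ_lt_succ hf)
        · intro p hp
          simp only [List.mem_cons] at hp
          rcases hp with h | h
          · subst h; simpa using hcur
          · exact hacc _ h
        · simp
      · rw [if_neg]
        · apply ih rest (c :: cur) acc (by simpa using Nat.lt_of_succ_lt_succ hf) hacc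
          intro h
          rcases List.mem_cons.1 h with h | h
          · exact hc h.symm
          · exact hcur h
        · simp [List.isPrefixOf]
          intro h; exact hc h.symm

theorem pvIds_eq (nm : String) :
    pvIds nm = (PySem.Chars.splitOn (PySem.Str.replace (PySem.Str.replace nm pvPrefix "") ".jpg" "").toList ['_']).map String.ofList := by
  have h : "_".toList = ['_'] := by decide
  simp [pvIds, PySem.Str.split?, PySem.Chars.split?, h]

theorem pv_splitOn_ne_nil (cs : List Char) : PySem.Chars.splitOn cs ['_'] ≠ [] := by
  simp only [PySem.Chars.splitOn]
  exact pv_go_ne_nil _ _ _ _ _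

theorem pv_splitOn_usc_free (cs : List Char) : ∀ p ∈ PySem.Chars.splitOn cs ['_'], '_' ∉ p := by
  simp only [PySem.Chars.splitOn]
  exact pv_go_usc_free _ _ _ _ (by omega) (by simp) (by simp)

theorem pvIds_ne_nil (nm : String) : pvIds nm ≠ [] := by
  rw [pvIds_eq]
  simp only [ne_eq, List.map_eq_nil_iff]
  exact pv_splitOn_ne_nil _

theorem pvIds_usc_free (nm : String) : ∀ s ∈ pvIds nm, '_' ∉ s.toList := by
  rw [pvIds_eq]
  intro s hs
  rcases List.mem_map.1 hs with ⟨p, hp, rfl⟩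
  simpa using pv_splitOn_usc_free _ p hp

theorem pvRecon_inj (x y : List String) (hx : x ≠ []) (hy : y ≠ [])
    (hfx : ∀ s ∈ x, '_' ∉ s.toList) (hfy : ∀ s ∈ y, '_' ∉ s.toList)
    (h : pvRecon x = pvRecon y) : x = y := by
  have h' : (pvRecon x).toList = (pvRecon y).toList := by rw [h]
  simp only [pvRecon, String.toList_append, PySem.Str.toList_join] at h'
  have hj : PySem.Chars.join "_".toList (x.map String.toList)
      = PySem.Chars.join "_".toList (y.map String.toList) := by
    have := List.append_cancel_right h'
    exact List.append_cancel_left this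
  have hu : "_".toList = ['_'] := by decide
  simp only [PySem.Chars.join, hu] at hj
  have hx' : List.splitOn '_' (['_'].intercalate (x.map String.toList)) = x.map String.toList :=
    List.splitOn_intercalate _ _ (by intro l hl; rcases List.mem_map.1 hl with ⟨s, hs, rfl⟩; exact hfx s hs) (by simpa using hx)
  have hy' : List.splitOn '_' (['_'].intercalate (y.map String.toList)) = y.map String.toList :=
    List.splitOn_intercalate _ _ (by intro l hl; rcases List.mem_map.1 hl with ⟨s, hs, rfl⟩; exact hfy s hs) (by simpa using hy)
  have hmap : x.map String.toList = y.map String.toList := by rw [← hx', ← hy', hj]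
  have : Function.Injective String.toList := fun a b hab => String.toList_inj.1 hab
  exact List.map_injective_iff.2 this hmap

def pvKey (x : List String) : String := PySem.List.pyGetD x 0 ""

def pvGrp (L : List (List String)) (k : String) : List String :=
  (L.filter (fun x => PySem.List.pyGetD x 0 "" == k)).map pvRecon

def pvS (L : List (List String)) (f0 ks : List String) : List String :=
  f0 ++ ks.flatMap (fun k => if (pvGrp L k).length == 1 then pvGrp L k else [])

def pvR (L : List (List String)) (ks : List String) : List (List String) :=
  (ks.filter (fun k => !((pvGrp L k).length == 1))).map (pvGrp L)

def pvMkD (P : List (List String)) : PySem.Dict String (List String) :=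
  ⟨(PySem.List.dedup (P.map pvKey)).map (fun k => (k, pvGrp P k))⟩

theorem pv_dedup_append_singleton {α : Type} [BEq α] [LawfulBEq α] (l : List α) (a : α) :
    PySem.List.dedup (l ++ [a])
      = if a ∈ l then PySem.List.dedup l else PySem.List.dedup l ++ [a] := by
  have hfold : PySem.List.dedup (l ++ [a]) = PySem.Set.add (PySem.List.dedup l) a := by
    simp [PySem.List.dedup, PySem.Set.ofList, List.foldl_append]
  rw [hfold]
  by_cases h : a ∈ l
  · have hc : (PySem.List.dedup l).contains a = true := by
      simp [PySem.List.dedup, PySem.Set.mem_ofList, h]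
    simp [PySem.Set.add, h]
  · have hc : (PySem.List.dedup l).contains a = false := by
      simp [PySem.List.dedup, PySem.Set.mem_ofList, h]
    simp [PySem.Set.add, h]

theorem pv_mem_dedup' {α : Type} [BEq α] [LawfulBEq α] (l : List α) (a : α) :
    a ∈ PySem.List.dedup l ↔ a ∈ l := PySem.List.mem_dedup l a

theorem pv_grp_append_of_ne (P : List (List String)) (x : List String) (k : String)
    (h : pvKey x ≠ k) : pvGrp (P ++ [x]) k = pvGrp P k := by
  have hb : (PySem.List.pyGetD x 0 "" == k) = false := by
    simpa [pvKey] using h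
  simp [pvGrp, List.filter_append, hb]

theorem pv_grp_append_self (P : List (List String)) (x : List String) :
    pvGrp (P ++ [x]) (pvKey x) = pvGrp P (pvKey x) ++ [pvRecon x] := by
  have hb : (PySem.List.pyGetD x 0 "" == pvKey x) = true := by simp [pvKey]
  simp [pvGrp, List.filter_append, hb]

theorem pv_grp_nil_of_not_mem (P : List (List String)) (k : String)
    (h : k ∉ P.map pvKey) : pvGrp P k = [] := by
  simp only [pvGrp, List.map_eq_nil_iff]
  rw [List.filter_eq_nil_iff]
  intro x hx
  simp only [Bool.not_eq_true, beq_eq_false_iff_ne, ne_eq]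
  intro he
  exact h (List.mem_map.2 ⟨x, hx, he⟩)

theorem pv_find?_map_keys (g : String → List String) (ks : List String) (k : String) (hk : k ∈ ks) :
    List.find? (fun p => p.1 == k) (ks.map (fun k' => (k', g k'))) = some (k, g k) := by
  induction ks with
  | nil => simp at hk
  | cons k' t ih =>
    simp only [List.map_cons, List.find?_cons]
    by_cases h : k' = k
    · subst h; simp
    · have hb : (k' == k) = false := by simpa using h
      simp only [hb]
      exact ih (by rcases List.mem_cons.1 hk with h' | h'
                   · exact absurd h'.symm h
                   · exact h')

theorem pvMkD_get?_mem (P : List (List String)) (k : String) (hk : k ∈ PySem.List.dedup (P.map pvKey)) :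
    (pvMkD P).get? k = some (pvGrp P k) := by
  simp only [pvMkD, PySem.Dict.get?, pv_find?_map_keys (pvGrp P) _ k hk]
  rfl

theorem pvMkD_contains (P : List (List String)) (k : String) :
    (pvMkD P).contains k = decide (k ∈ P.map pvKey) := by
  simp only [pvMkD, PySem.Dict.contains, List.any_map]
  by_cases h : k ∈ P.map pvKey
  · have : (PySem.List.dedup (P.map pvKey)).any (fun k' => k' == k) = true := by
      simp only [List.any_eq_true]
      exact ⟨k, (pv_mem_dedup' _ _).2 h, by simp⟩
    simp only [Function.comp_def]
    rw [this]
    simp [h]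
  · have : (PySem.List.dedup (P.map pvKey)).any (fun k' => k' == k) = false := by
      simp only [List.any_eq_false]
      intro k' hk'
      have hne : k' ≠ k := fun he => h (he ▸ (pv_mem_dedup' _ _).1 hk')
      simpa using hne
    simp only [Function.comp_def]
    rw [this]
    simp [h]

theorem pvMkD_step (P : List (List String)) (x : List String) :
    (pvMkD P).modify (pvKey x) [] (fun g => g ++ [pvRecon x]) = pvMkD (P ++ [x]) := by
  simp only [PySem.Dict.modify, PySem.Dict.insert]
  by_cases h : pvKey x ∈ P.map pvKey
  · rw [pvMkD_contains, if_pos (by simpa using h)]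
    have hget : (pvMkD P).getD (pvKey x) [] = pvGrp P (pvKey x) := by
      simp [PySem.Dict.getD, pvMkD_get?_mem P (pvKey x) ((pv_mem_dedup' _ _).2 h)]
    rw [hget]
    have hded : PySem.List.dedup ((P ++ [x]).map pvKey) = PySem.List.dedup (P.map pvKey) := by
      rw [List.map_append, List.map_singleton, pv_dedup_append_singleton, if_pos h]
    apply PySem.Dict.ext
    simp only [pvMkD, hded, List.map_map]
    apply List.map_congr_left
    intro k hk
    simp only [Function.comp]
    by_cases hke : k = pvKey x
    · subst hke
      simp [pv_grp_append_self]
    · have hb : (k == pvKey x) = false := by simpa using hke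
      simp [hb, pv_grp_append_of_ne P x k (fun he => hke he.symm)]
  · rw [pvMkD_contains, if_neg (by simpa using h)]
    have hget : (pvMkD P).getD (pvKey x) [] = [] := by
      have : (pvMkD P).get? (pvKey x) = none := by
        simp only [PySem.Dict.get?, Option.map_eq_none_iff, List.find?_eq_none]
        intro p hp
        rcases List.mem_map.1 hp with ⟨k', hk', rfl⟩
        have hne : k' ≠ pvKey x := fun he => h (he ▸ (pv_mem_dedup' _ _).1 hk')
        simpa using hne
      simp [PySem.Dict.getD, this]
    rw [hget]
    have hded : PySem.List.dedup ((P ++ [x]).map pvKey)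
        = PySem.List.dedup (P.map pvKey) ++ [pvKey x] := by
      rw [List.map_append, List.map_singleton, pv_dedup_append_singleton, if_neg h]
    apply PySem.Dict.ext
    simp only [pvMkD]
    rw [hded, List.map_append, List.map_singleton]
    congr 1
    · apply List.map_congr_left
      intro k hk
      have hke : k ≠ pvKey x := by
        intro he; subst he
        exact h ((pv_mem_dedup' _ _).1 hk)
      rw [pv_grp_append_of_ne P x k (fun he => hke he.symm)]
    · rw [pv_grp_append_self, pv_grp_nil_of_not_mem P (pvKey x) h]

theorem pvDict_fold (rest : List (List String)) : ∀ (P : List (List String)),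
    rest.foldl (fun d x => d.modify (PySem.List.pyGetD x 0 "") [] (fun g => g ++ [pvRecon x])) (pvMkD P)
      = pvMkD (P ++ rest) := by
  induction rest with
  | nil => intro P; simp
  | cons x t ih =>
    intro P
    simp only [List.foldl_cons]
    have : (pvMkD P).modify (PySem.List.pyGetD x 0 "") [] (fun g => g ++ [pvRecon x]) = pvMkD (P ++ [x]) :=
      pvMkD_step P x
    rw [this, ih (P ++ [x])]
    simp

theorem pvMkD_nil : pvMkD [] = PySem.Dict.empty := by
  apply PySem.Dict.ext
  simp [pvMkD, PySem.List.dedup, PySem.Set.ofList, PySem.Dict.empty]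

theorem pvMkD_values (P : List (List String)) :
    (pvMkD P).values = (PySem.List.dedup (P.map pvKey)).map (pvGrp P) := by
  simp [pvMkD, PySem.Dict.values, List.map_map, Function.comp]

theorem pvS_append (L : List (List String)) (f0 ks : List String) (k : String) :
    pvS L f0 (ks ++ [k])
      = pvS L f0 ks ++ (if (pvGrp L k).length == 1 then pvGrp L k else []) := by
  simp [pvS]

theorem pvR_append (L : List (List String)) (ks : List String) (k : String) :
    pvR L (ks ++ [k])
      = pvR L ks ++ (if !((pvGrp L k).length == 1) then [pvGrp L k] else []) := by
  by_cases h : ((pvGrp L k).length == 1) = true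
  · simp [pvR, List.filter_append, h]
  · simp only [Bool.not_eq_true] at h
    simp [pvR, List.filter_append, h]

theorem pvA2 (L : List (List String)) (f0 : List String)
    (hprop : ∀ x ∈ L, x ≠ [] ∧ ∀ s ∈ x, '_' ∉ s.toList) :
    ∀ (rest Q : List (List String)), L = Q ++ rest →
    rest.foldl
      (fun (st : List String × List (List String)) id_s =>
        let id_include := L.filter
          (fun x => PySem.List.pyGetD x 0 "" == PySem.List.pyGetD id_s 0 "")
        if id_include.length == 1 then (st.1 ++ [pvRecon id_s], st.2)
        else
          let report_s := id_include.map pvRecon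
          if report_s ∈ st.2 then st else (st.1, st.2 ++ [report_s]))
      (pvS L f0 (PySem.List.dedup (Q.map pvKey)), pvR L (PySem.List.dedup (Q.map pvKey)))
      = (pvS L f0 (PySem.List.dedup (L.map pvKey)), pvR L (PySem.List.dedup (L.map pvKey))) := by
  intro rest
  induction rest with
  | nil => intro Q hQ; subst hQ; simp
  | cons x t ih =>
    intro Q hQ
    simp only [List.foldl_cons]
    have hxL : x ∈ L := by rw [hQ]; exact List.mem_append.2 (Or.inr (List.mem_cons_self))
    have hpredx : (PySem.List.pyGetD x 0 "" == PySem.List.pyGetD x 0 "") = true := by simp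
    have hxfil : x ∈ L.filter (fun y => PySem.List.pyGetD y 0 "" == PySem.List.pyGetD x 0 "") :=
      List.mem_filter.2 ⟨hxL, hpredx⟩
    have hgrp : (L.filter (fun y => PySem.List.pyGetD y 0 "" == PySem.List.pyGetD x 0 "")).map pvRecon
        = pvGrp L (pvKey x) := by simp [pvGrp, pvKey]
    have hassoc : L = (Q ++ [x]) ++ t := by rw [hQ]; simp
    by_cases hQmem : pvKey x ∈ Q.map pvKey
    · rcases List.mem_map.1 hQmem with ⟨x', hx'Q, hx'k⟩
      have hx'fil : x' ∈ Q.filter (fun y => PySem.List.pyGetD y 0 "" == PySem.List.pyGetD x 0 "") := by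
        refine List.mem_filter.2 ⟨hx'Q, ?_⟩
        have : PySem.List.pyGetD x' 0 "" = PySem.List.pyGetD x 0 "" := hx'k
        simp [this]
      have hlen2 : 2 ≤ (L.filter (fun y => PySem.List.pyGetD y 0 "" == PySem.List.pyGetD x 0 "")).length := by
        rw [hQ, List.filter_append, List.length_append]
        have h1 : 1 ≤ (Q.filter (fun y => PySem.List.pyGetD y 0 "" == PySem.List.pyGetD x 0 "")).length :=
          List.length_pos_of_mem hx'fil
        have h2 : 1 ≤ ((x :: t).filter (fun y => PySem.List.pyGetD y 0 "" == PySem.List.pyGetD x 0 "")).length :=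
          List.length_pos_of_mem (List.mem_filter.2 ⟨List.mem_cons_self, hpredx⟩)
        omega
      have hlenb : ((L.filter (fun y => PySem.List.pyGetD y 0 "" == PySem.List.pyGetD x 0 "")).length == 1) = false := by
        simp only [beq_eq_false_iff_ne, ne_eq]
        omega
      have hmulti : (!((pvGrp L (pvKey x)).length == 1)) = true := by
        have : (pvGrp L (pvKey x)).length
            = (L.filter (fun y => PySem.List.pyGetD y 0 "" == PySem.List.pyGetD x 0 "")).length := by
          rw [← hgrp]; simp
        simp only [Bool.not_eq_true', beq_eq_false_iff_ne, ne_eq, this]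
        omega
      have hrep : pvGrp L (pvKey x) ∈ pvR L (PySem.List.dedup (Q.map pvKey)) := by
        apply List.mem_map_of_mem
        exact List.mem_filter.2 ⟨(pv_mem_dedup' _ _).2 hQmem, hmulti⟩
      have hdedup : PySem.List.dedup ((Q ++ [x]).map pvKey) = PySem.List.dedup (Q.map pvKey) := by
        rw [List.map_append, List.map_singleton, pv_dedup_append_singleton, if_pos hQmem]
      simp only [hlenb, if_false, Bool.false_eq_true]
      rw [hgrp, if_pos hrep]
      have := ih (Q ++ [x]) hassoc
      rw [hdedup] at this
      exact this
    · have hdedup : PySem.List.dedup ((Q ++ [x]).map pvKey)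
          = PySem.List.dedup (Q.map pvKey) ++ [pvKey x] := by
        rw [List.map_append, List.map_singleton, pv_dedup_append_singleton, if_neg hQmem]
      by_cases hlen : ((L.filter (fun y => PySem.List.pyGetD y 0 "" == PySem.List.pyGetD x 0 "")).length == 1) = true
      · rcases List.length_eq_one_iff.1 (by simpa using hlen) with ⟨a, ha⟩
        have hax : a = x := by
          have := hxfil
          rw [ha] at this
          exact (List.mem_singleton.1 this).symm
        subst hax
        rw [if_pos hlen]
        have hgone : (if ((pvGrp L (pvKey a)).length == 1) = true then pvGrp L (pvKey a) else [])
            = [pvRecon a] := by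
          rw [if_pos]
          · rw [← hgrp, ha]; simp
          · have : (pvGrp L (pvKey a)).length = 1 := by rw [← hgrp, ha]; simp
            simp [this]
        have := ih (Q ++ [a]) hassoc
        rw [hdedup] at this
        rw [pvS_append, pvR_append] at this
        rw [hgone] at this
        have hnomulti : (if (!((pvGrp L (pvKey a)).length == 1)) = true then [pvGrp L (pvKey a)] else []) = [] := by
          rw [if_neg]
          have : (pvGrp L (pvKey a)).length = 1 := by rw [← hgrp, ha]; simp
          simp [this]
        rw [hnomulti] at this
        simp only [List.append_nil] at this
        exact this
      · rw [if_neg hlen]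
        have hnotin : (L.filter (fun y => PySem.List.pyGetD y 0 "" == PySem.List.pyGetD x 0 "")).map pvRecon
            ∉ pvR L (PySem.List.dedup (Q.map pvKey)) := by
          rw [hgrp]
          intro hmem
          rcases List.mem_map.1 hmem with ⟨k', hk', heq⟩
          have hk'Q : k' ∈ Q.map pvKey := (pv_mem_dedup' _ _).1 (List.mem_filter.1 hk').1
          rcases List.mem_map.1 hk'Q with ⟨x', hx'Q, hx'k⟩
          have hx'fil : x' ∈ L.filter (fun y => PySem.List.pyGetD y 0 "" == k') := by
            have hpk : PySem.List.pyGetD x' 0 "" = k' := hx'k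
            refine List.mem_filter.2 ⟨by rw [hQ]; exact List.mem_append.2 (Or.inl hx'Q), by simp [hpk]⟩
          have hxfil' : x ∈ L.filter (fun y => PySem.List.pyGetD y 0 "" == pvKey x) := by
            refine List.mem_filter.2 ⟨hxL, by simp [pvKey]⟩
          rcases List.exists_cons_of_ne_nil (List.ne_nil_of_mem hx'fil) with ⟨y', t', hty'⟩
          rcases List.exists_cons_of_ne_nil (List.ne_nil_of_mem hxfil') with ⟨y, ty, hty⟩
          have heq' : pvGrp L k' = pvGrp L (pvKey x) := heq
          have hrecon : pvRecon y' = pvRecon y := by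
            have h1 : pvGrp L k' = pvRecon y' :: t'.map pvRecon := by simp [pvGrp, hty']
            have h2 : pvGrp L (pvKey x) = pvRecon y :: ty.map pvRecon := by simp [pvGrp, hty]
            rw [h1, h2] at heq'
            exact (List.cons.injEq _ _ _ _ ▸ heq').1
          have hy'L : y' ∈ L := (List.mem_filter.1 (hty' ▸ List.mem_cons_self)).1
          have hyL : y ∈ L := (List.mem_filter.1 (hty ▸ List.mem_cons_self)).1
          have hyy : y' = y := by
            rcases hprop y' hy'L with ⟨hn1, hf1⟩
            rcases hprop y hyL with ⟨hn2, hf2⟩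
            exact pvRecon_inj y' y hn1 hn2 hf1 hf2 hrecon
          have hky' : PySem.List.pyGetD y' 0 "" = k' := by
            have := (List.mem_filter.1 (hty' ▸ List.mem_cons_self)).2
            simpa using this
          have hky : PySem.List.pyGetD y 0 "" = pvKey x := by
            have := (List.mem_filter.1 (hty ▸ List.mem_cons_self)).2
            simpa using this
          have : k' = pvKey x := by rw [← hky', ← hky, hyy]
          subst this
          exact hQmem hk'Q
        rw [if_neg hnotin]
        have := ih (Q ++ [x]) hassoc
        rw [hdedup, pvS_append, pvR_append] at this
        have hmulti : (!((pvGrp L (pvKey x)).length == 1)) = true := by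
          have hle : (pvGrp L (pvKey x)).length
              = (L.filter (fun y => PySem.List.pyGetD y 0 "" == PySem.List.pyGetD x 0 "")).length := by
            rw [← hgrp]; simp
          simp only [Bool.not_eq_true', beq_eq_false_iff_ne, ne_eq, hle]
          simpa using hlen
        rw [if_neg (by simpa using hmulti : ¬ ((pvGrp L (pvKey x)).length == 1) = true)] at this
        rw [if_pos hmulti] at this
        simp only [List.append_nil] at this
        rw [← this, ← hgrp]

-- A's first loop, run from any accumulator, is the pair of filters B computes directly
theorem pv_stage1 (names : List String) : ∀ (f : List String) (r : List (List String)),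
    names.foldl
      (fun (st : List String × List (List String)) name =>
        let ids := pvIds name
        if ids.length == 1 then (st.1 ++ [name], st.2) else (st.1, st.2 ++ [ids]))
      (f, r)
      = (f ++ names.filter (fun n => (pvIds n).length == 1),
         r ++ (names.filter (fun n => !((pvIds n).length == 1))).map pvIds) := by
  induction names with
  | nil => intro f r; simp
  | cons n t ih =>
    intro f r
    simp only [List.foldl_cons, List.filter_cons]
    by_cases h : ((pvIds n).length == 1) = true
    · simp only [h, if_true, ih]
      simp
    · simp only [h, Bool.false_eq_true, if_false, ih]
      simp

theorem pv_grp_ne_nil (L : List (List String)) (k : String)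
    (hk : k ∈ PySem.List.dedup (L.map pvKey)) : pvGrp L k ≠ [] := by
  rcases List.mem_map.1 ((pv_mem_dedup' _ _).1 hk) with ⟨x, hxL, hxk⟩
  have : x ∈ L.filter (fun y => PySem.List.pyGetD y 0 "" == k) := by
    have hpk : PySem.List.pyGetD x 0 "" = k := hxk
    exact List.mem_filter.2 ⟨hxL, by simp [hpk]⟩
  simp only [pvGrp, ne_eq, List.map_eq_nil_iff]
  exact List.ne_nil_of_mem this

-- pvS/pvR over a key list of nonempty groups are B's two comprehensions over the group list
theorem pv_flat_singles (L : List (List String)) (ks : List String) :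
    ks.flatMap (fun k => if (pvGrp L k).length == 1 then pvGrp L k else [])
      = ((ks.map (pvGrp L)).filter (fun g => g.length == 1)).map (fun g => PySem.List.pyGetD g 0 "") := by
  induction ks with
  | nil => simp
  | cons k t ih =>
    simp only [List.flatMap_cons, List.map_cons, List.filter_cons]
    by_cases h : ((pvGrp L k).length == 1) = true
    · rcases List.length_eq_one_iff.1 (by simpa using h) with ⟨a, ha⟩
      rw [if_pos h, ih, if_pos h, List.map_cons, ha]
      simp [PySem.List.pyGetD, PySem.List.pyGet?, PySem.List.pyIdx?]
    · simp only [if_neg h, ih, List.nil_append]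

theorem pv_filt_reports (L : List (List String)) (ks : List String)
    (hne : ∀ k ∈ ks, pvGrp L k ≠ []) :
    pvR L ks = (ks.map (pvGrp L)).filter (fun g => decide (1 < g.length)) := by
  induction ks with
  | nil => simp [pvR]
  | cons k t ih =>
    have ih' := ih (fun k' hk' => hne k' (List.mem_cons_of_mem _ hk'))
    have hknil := hne k List.mem_cons_self
    simp only [pvR, List.filter_cons, List.map_cons] at *
    by_cases h : ((pvGrp L k).length == 1) = true
    · have h2 : (decide (1 < (pvGrp L k).length)) = false := by
        have : (pvGrp L k).length = 1 := by simpa using h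
        simp [this]
      simp [h, h2, ih']
    · have hlen : 1 < (pvGrp L k).length := by
        have h0 : (pvGrp L k).length ≠ 0 := by
          simpa [List.length_eq_zero_iff] using hknil
        have h1 : (pvGrp L k).length ≠ 1 := by simpa using h
        omega
      simp [h, hlen, ih']

theorem pv_SR_comprehension (L : List (List String)) (f0 : List String) (ks : List String)
    (hne : ∀ k ∈ ks, pvGrp L k ≠ []) :
    pvS L f0 ks
      = f0 ++ ((ks.map (pvGrp L)).filter (fun g => g.length == 1)).map (fun g => PySem.List.pyGetD g 0 "")
    ∧ pvR L ks = (ks.map (pvGrp L)).filter (fun g => decide (1 < g.length)) := by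
  exact ⟨by rw [pvS, pv_flat_singles], pv_filt_reports L ks hne⟩

theorem pv_main (names : List String) : file_split names = file_split_alt names := by
  unfold file_split file_split_alt
  have hrange : (PySem.List.pyRange 0 (PySem.List.len names)).foldl
      (fun (st : List String × List (List String)) nid =>
        let name := PySem.List.pyGetD names nid ""
        let ids := pvIds name
        if ids.length == 1 then (st.1 ++ [name], st.2) else (st.1, st.2 ++ [ids]))
      ([], [])
      = names.foldl
      (fun (st : List String × List (List String)) name =>
        let ids := pvIds name
        if ids.length == 1 then (st.1 ++ [name], st.2) else (st.1, st.2 ++ [ids]))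
      ([], []) := by
    have := PySem.List.foldl_pyRange_pyGetD names ""
      (fun (st : List String × List (List String)) name =>
        let ids := pvIds name
        if ids.length == 1 then (st.1 ++ [name], st.2) else (st.1, st.2 ++ [ids]))
      ([], []) (a := 0) le_rfl
    simpa using this
  rw [hrange, pv_stage1 names [] []]
  simp only [List.nil_append]
  set f0 := names.filter (fun n => (pvIds n).length == 1) with hf0
  set M := (names.filter (fun n => !((pvIds n).length == 1))).map pvIds with hM
  set L := PySem.List.sorted M (fun x => PySem.List.pyGetD x 1 "") false with hLdef
  have hprop : ∀ x ∈ L, x ≠ [] ∧ ∀ s ∈ x, '_' ∉ s.toList := by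
    intro x hx
    have hx2 : x ∈ M := (PySem.List.mem_sorted _ _ _ _).1 hx
    rcases List.mem_map.1 hx2 with ⟨n, _, rfl⟩
    exact ⟨pvIds_ne_nil n, pvIds_usc_free n⟩
  have hA := pvA2 L f0 hprop L [] rfl
  have hS0 : pvS L f0 (PySem.List.dedup (List.map pvKey [])) = pvS L f0 [] := by
    simp [PySem.List.dedup, PySem.Set.ofList]
  have hR0 : pvR L (PySem.List.dedup (List.map pvKey [])) = pvR L [] := by
    simp [PySem.List.dedup, PySem.Set.ofList]
  have hS0' : pvS L f0 ([] : List String) = f0 := by simp [pvS]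
  have hR0' : pvR L ([] : List String) = [] := by simp [pvR]
  rw [hS0, hR0, hS0', hR0'] at hA
  rw [hA]
  have hD : L.foldl
      (fun (d : PySem.Dict String (List String)) ids =>
        d.modify (PySem.List.pyGetD ids 0 "") [] (fun g => g ++ [pvRecon ids]))
      PySem.Dict.empty = pvMkD L := by
    rw [← pvMkD_nil]
    have := pvDict_fold L []
    simpa using this
  rw [hD, pvMkD_values]
  rcases pv_SR_comprehension L f0 (PySem.List.dedup (L.map pvKey))
    (fun k hk => pv_grp_ne_nil L k hk) with ⟨hS, hR⟩
  rw [hS, hR]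

-- ===== VERDICT (by name: the statement is the Claim_ definition above) =====
theorem file_split_spec : Claim_equal_file_split := by
  intro names _
  exact pv_main names
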